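-- pv_equiv track=rewrite | github.com/deflect-ca/baskerville | src/baskerville/spark/udfs.py | normalize_host_name
-- ===== SOURCE A (Python) =====
-- def normalize_host_name(host):
--     if host[:4] == 'www.':
--         host = host[4:]
--     h_split = host.replace(':', '.').split('.')
--     host_norm = max(h_split, key=len)
--     if len(set([h for h in h_split if len(h) == len(host_norm)])) > 1:
--         host_norm = host
--     host_norm = host_norm.lower()
--
--     return host_norm
-- ===== SOURCE B (Python) =====
-- def normalize_host_name(host):
--     if host.startswith('www.'):
--         host = host[4:]
--     segs = host.replace(':', '.').split('.')
--     best = segs[0]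
--     ties = {best}
--     for seg in segs[1:]:
--         if len(seg) > len(best):
--             best, ties = seg, {seg}
--         elif len(seg) == len(best):
--             ties.add(seg)
--     return (host if len(ties) > 1 else best).lower()
-- ===== Notes on version B (the rewrite author's own statement) =====
-- stated objective: alternative
-- what changed: Replaces max(h_split, key=len) followed by a separate filtering set comprehension (two passes over the segments) with a single accumulating pass that maintains the current longest segment (first on ties) together with the set of distinct segments of that length.
import Mathlib
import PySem

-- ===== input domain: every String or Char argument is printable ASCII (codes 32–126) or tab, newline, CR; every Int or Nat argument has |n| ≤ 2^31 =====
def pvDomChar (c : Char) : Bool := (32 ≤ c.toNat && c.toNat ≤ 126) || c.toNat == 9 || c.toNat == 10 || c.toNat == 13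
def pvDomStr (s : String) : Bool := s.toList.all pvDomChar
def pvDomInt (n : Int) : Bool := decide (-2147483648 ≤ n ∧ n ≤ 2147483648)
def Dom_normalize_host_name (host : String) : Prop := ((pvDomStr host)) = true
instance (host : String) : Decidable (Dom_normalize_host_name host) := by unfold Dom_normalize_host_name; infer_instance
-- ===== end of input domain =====

-- B replaces A's max(h_split, key=len) pass plus a separate filtering set comprehension with a
-- single accumulating pass over the segments (running longest segment, first on ties, plus the
-- set of distinct segments of that length); return values are proved equal on all inputs.

-- ===== PORT A =====
def nhnNorm (h_split : List String) (host : String) : String :=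
  match PySem.List.max? h_split PySem.Str.len with
  | none => ""   -- unreachable totality guard: str.split never returns an empty list
  | some m =>
    let host_norm := if PySem.Set.len (PySem.Set.ofList (h_split.filter (fun h => PySem.Str.len h == PySem.Str.len m))) > 1 then host else m
    PySem.Str.lower host_norm

def normalize_host_name (host : String) : String :=
  let host := if PySem.Str.slice host none (some 4) = "www." then PySem.Str.slice host (some 4) none else host
  nhnNorm ((PySem.Str.split? (PySem.Str.replace host ":" ".") ".").getD []) host

-- ===== PORT B =====
def nhnStep (st : String × PySem.Set String) (seg : String) : String × PySem.Set String :=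
  if PySem.Str.len st.1 < PySem.Str.len seg then (seg, PySem.Set.ofList [seg])
  else if PySem.Str.len seg = PySem.Str.len st.1 then (st.1, PySem.Set.add st.2 seg)
  else st

def nhnScan (segs : List String) (host : String) : String :=
  match segs with
  | [] => ""   -- unreachable totality guard: str.split never returns an empty list
  | s0 :: rest =>
    let st := rest.foldl nhnStep (s0, PySem.Set.ofList [s0])
    PySem.Str.lower (if PySem.Set.len st.2 > 1 then host else st.1)

def normalize_host_name_alt (host : String) : String :=
  let host := if PySem.Str.startswith host "www." then PySem.Str.slice host (some 4) none else host
  nhnScan ((PySem.Str.split? (PySem.Str.replace host ":" ".") ".").getD []) host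

-- ===== PRECONDITION & SPEC =====
def Spec_normalize_host_name (host : String) (out : String) : Prop := out = normalize_host_name_alt host
instance (host : String) (out : String) : Decidable (Spec_normalize_host_name host out) := by unfold Spec_normalize_host_name; infer_instance

-- ===== CLAIM (what is proved, stated in full; the proofs are below) =====
def Claim_equal_normalize_host_name : Prop := ∀ (host : String), Dom_normalize_host_name host → Spec_normalize_host_name host (normalize_host_name host)

-- ===== LEMMAS AND PROOFS =====

lemma nhn_startswith (s : String) :
    PySem.Str.startswith s "www." = true ↔ PySem.Str.slice s none (some 4) = "www." := by
  simp only [PySem.Str.startswith, PySem.Chars.startswith, PySem.Str.slice, PySem.Chars.slice]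
  rw [show PySem.List.slice s.toList none (some 4) = s.toList.take (Int.toNat 4) from PySem.List.slice_to _ (by norm_num)]
  rw [List.isPrefixOf_iff_prefix, List.prefix_iff_eq_take]
  constructor
  · intro h
    have h2 : List.take (Int.toNat 4) s.toList = ("www." : String).toList := by
      simpa using h.symm
    rw [h2]; simp
  · intro h
    have h2 : (List.take (Int.toNat 4) s.toList) = ("www.":String).toList := by
      have := congrArg String.toList h; simpa using this
    simpa using h2.symm

lemma nhn_ofList_append_singleton (ys : List String) (x : String) :
    PySem.Set.ofList (ys ++ [x]) = PySem.Set.add (PySem.Set.ofList ys) x := by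
  simp [PySem.Set.ofList_eq_foldl, List.foldl_append]

lemma nhn_max?_append_singleton (acc : List String) (x : String) (b : String)
    (hb : PySem.List.max? acc PySem.Str.len = some b) :
    PySem.List.max? (acc ++ [x]) PySem.Str.len =
      (if PySem.Str.len b < PySem.Str.len x then some x else some b) := by
  simp only [PySem.List.max?, List.foldl_append] at *
  rw [hb]; simp [List.foldl]

lemma nhn_loop (rest : List String) : ∀ (acc : List String) (b : String),
    PySem.List.max? acc PySem.Str.len = some b →
    ∃ m, PySem.List.max? (acc ++ rest) PySem.Str.len = some m ∧
      rest.foldl nhnStep (b, PySem.Set.ofList (acc.filter (fun h => PySem.Str.len h == PySem.Str.len b)))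
        = (m, PySem.Set.ofList ((acc ++ rest).filter (fun h => PySem.Str.len h == PySem.Str.len m))) := by
  induction rest with
  | nil => intro acc b hb; exact ⟨b, by simpa using hb, by simp⟩
  | cons x rs ih =>
    intro acc b hb
    have hmax := nhn_max?_append_singleton acc x b hb
    have hcons : acc ++ x :: rs = (acc ++ [x]) ++ rs := by simp
    by_cases hlt : PySem.Str.len b < PySem.Str.len x
    · have hmax' : PySem.List.max? (acc ++ [x]) PySem.Str.len = some x := by
        rw [hmax, if_pos hlt]
      have hfilt : (acc ++ [x]).filter (fun h => PySem.Str.len h == PySem.Str.len x) = [x] := by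
        rw [List.filter_append]
        have h1 : acc.filter (fun h => PySem.Str.len h == PySem.Str.len x) = [] := by
          rw [List.filter_eq_nil_iff]
          intro y hy
          have := PySem.List.max?_isMax hb y hy
          simp only [beq_iff_eq]
          omega
        rw [h1]; simp
      obtain ⟨m, hm, hf⟩ := ih (acc ++ [x]) x hmax'
      refine ⟨m, by rwa [hcons], ?_⟩
      rw [List.foldl_cons]
      have hstep : nhnStep (b, PySem.Set.ofList (acc.filter (fun h => PySem.Str.len h == PySem.Str.len b))) x
          = (x, PySem.Set.ofList ((acc ++ [x]).filter (fun h => PySem.Str.len h == PySem.Str.len x))) := by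
        simp only [nhnStep]; rw [if_pos hlt, hfilt]
      rw [hstep, hcons]
      rw [hfilt] at hf ⊢
      exact hf
    · by_cases heq : PySem.Str.len x = PySem.Str.len b
      · have hmax' : PySem.List.max? (acc ++ [x]) PySem.Str.len = some b := by
          rw [hmax, if_neg hlt]
        have hfilt : (acc ++ [x]).filter (fun h => PySem.Str.len h == PySem.Str.len b)
            = acc.filter (fun h => PySem.Str.len h == PySem.Str.len b) ++ [x] := by
          have heq' : x.length = b.length := by simpa [PySem.Str.len] using heq
          rw [List.filter_append]; simp [PySem.Str.len, heq']
        obtain ⟨m, hm, hf⟩ := ih (acc ++ [x]) b hmax'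
        refine ⟨m, by rwa [hcons], ?_⟩
        rw [List.foldl_cons]
        have hstep : nhnStep (b, PySem.Set.ofList (acc.filter (fun h => PySem.Str.len h == PySem.Str.len b))) x
            = (b, PySem.Set.ofList ((acc ++ [x]).filter (fun h => PySem.Str.len h == PySem.Str.len b))) := by
          simp only [nhnStep]; rw [if_neg hlt, if_pos heq, hfilt, nhn_ofList_append_singleton]
        rw [hstep, hcons]
        exact hf
      · have hmax' : PySem.List.max? (acc ++ [x]) PySem.Str.len = some b := by
          rw [hmax, if_neg hlt]
        have hfilt : (acc ++ [x]).filter (fun h => PySem.Str.len h == PySem.Str.len b)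
            = acc.filter (fun h => PySem.Str.len h == PySem.Str.len b) := by
          have heq' : ¬ x.length = b.length := by simpa [PySem.Str.len] using heq
          rw [List.filter_append]; simp [PySem.Str.len, heq']
        obtain ⟨m, hm, hf⟩ := ih (acc ++ [x]) b hmax'
        refine ⟨m, by rwa [hcons], ?_⟩
        rw [List.foldl_cons]
        have hstep : nhnStep (b, PySem.Set.ofList (acc.filter (fun h => PySem.Str.len h == PySem.Str.len b))) x
            = (b, PySem.Set.ofList ((acc ++ [x]).filter (fun h => PySem.Str.len h == PySem.Str.len b))) := by
          simp only [nhnStep]; rw [if_neg hlt, if_neg heq, hfilt]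
        rw [hstep, hcons]
        exact hf

lemma nhn_body (segs : List String) (h : String) : nhnNorm segs h = nhnScan segs h := by
  cases segs with
  | nil => rfl
  | cons s0 rest =>
    have h0 : PySem.List.max? [s0] PySem.Str.len = some s0 := rfl
    obtain ⟨m, hm, hf⟩ := nhn_loop rest [s0] s0 h0
    have hinit : PySem.Set.ofList ([s0].filter (fun x => PySem.Str.len x == PySem.Str.len s0)) = PySem.Set.ofList [s0] := by
      simp
    rw [hinit] at hf
    rw [show ([s0] ++ rest : List String) = s0 :: rest from rfl] at hm hf
    show nhnNorm (s0 :: rest) h = nhnScan (s0 :: rest) h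
    rw [nhnNorm, nhnScan, hm, hf]


-- ===== VERDICT (by name: the statement is the Claim_ definition above) =====
theorem normalize_host_name_spec : Claim_equal_normalize_host_name := by
  intro host _
  show normalize_host_name host = normalize_host_name_alt host
  rw [normalize_host_name, normalize_host_name_alt]
  by_cases hw : PySem.Str.slice host none (some 4) = "www."
  · have hb : PySem.Str.startswith host "www." = true := (nhn_startswith host).mpr hw
    rw [if_pos hw, if_pos hb]
    exact nhn_body _ _
  · have hb : PySem.Str.startswith host "www." = false := by
      rw [Bool.eq_false_iff]; exact fun h => hw ((nhn_startswith host).mp h)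
    rw [if_neg hw, hb]; simp only [Bool.false_eq_true, if_false]
    exact nhn_body _ _
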